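-- pv_equiv track=rewrite | github.com/eth-easl/modyn | benchmark/wildtime_benchmarks/data_generation_arxiv.py | filter_corrupted_lines
-- ===== SOURCE A (Python) =====
-- corrupted_idx_dict = {
--     2007: [33213],
--     2008: [22489],
--     2009: [64621, 165454],
--     2015: [42007, 94935],
--     2016: [111398],
--     2019: [41309, 136814],
--     2020: [102074],
--     2021: [32013, 55660]
-- }
--
-- def filter_corrupted_lines(year, rows):
--     if year in corrupted_idx_dict:
--         corrupted_idx = corrupted_idx_dict[year]
--         goodlines = []
--         for i, l in enumerate(rows):
--             if i not in corrupted_idx: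
--                 goodlines.append(l)
--         return goodlines
--     return rows
-- ===== SOURCE B (Python) =====
-- corrupted_idx_dict = {
--     2007: [33213],
--     2008: [22489],
--     2009: [64621, 165454],
--     2015: [42007, 94935],
--     2016: [111398],
--     2019: [41309, 136814],
--     2020: [102074],
--     2021: [32013, 55660]
-- }
--
-- def filter_corrupted_lines(year, rows):
--     if year not in corrupted_idx_dict:
--         return rows
--     result = list(rows)
--     for idx in sorted(corrupted_idx_dict[year], reverse=True):
--         if idx < len(result):
--             del result[idx]
--     return result
-- ===== Notes on version B (the rewrite author's own statement) =====
-- stated objective: alternative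
-- what changed: Instead of enumerating every row and testing each index against the corrupted list, B copies the rows once and deletes only the (at most two) known corrupted positions in descending order.
import Mathlib
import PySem

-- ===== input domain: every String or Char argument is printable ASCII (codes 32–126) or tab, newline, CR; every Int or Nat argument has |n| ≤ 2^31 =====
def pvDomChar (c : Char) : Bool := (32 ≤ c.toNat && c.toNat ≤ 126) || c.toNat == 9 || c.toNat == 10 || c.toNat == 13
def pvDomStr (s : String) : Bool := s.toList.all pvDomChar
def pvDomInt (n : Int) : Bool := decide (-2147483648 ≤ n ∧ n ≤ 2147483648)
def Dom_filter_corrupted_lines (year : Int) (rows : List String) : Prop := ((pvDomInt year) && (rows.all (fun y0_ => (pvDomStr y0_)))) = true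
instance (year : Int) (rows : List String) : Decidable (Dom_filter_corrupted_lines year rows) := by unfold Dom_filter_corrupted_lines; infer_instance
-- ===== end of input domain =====

-- B copies the rows once and deletes only the known corrupted positions (descending),
-- instead of enumerating every row and testing each index for membership.


-- the module constant corrupted_idx_dict (shared text of A and B; both treat it read-only)
def corruptedIdxDict : PySem.Dict Int (List Int) :=
  PySem.Dict.ofList [(2007, [33213]), (2008, [22489]), (2009, [64621, 165454]),
    (2015, [42007, 94935]), (2016, [111398]), (2019, [41309, 136814]),
    (2020, [102074]), (2021, [32013, 55660])]

-- ===== PORT A =====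
-- goodlines = []; for i, l in enumerate(rows): if i not in corrupted_idx: goodlines.append(l)
def pvA_loop (corrupted : List Int) (rows : List String) : List String :=
  (PySem.List.enumerate rows).foldl
    (fun acc p => if corrupted.contains p.1 then acc else acc ++ [p.2]) []

def filter_corrupted_lines (year : Int) (rows : List String) : List String :=
  match corruptedIdxDict.get? year with   -- 'if year in corrupted_idx_dict: … corrupted_idx_dict[year]'
  | some corrupted => pvA_loop corrupted rows
  | none => rows

-- ===== PORT B =====
-- for idx in sorted(idxs, reverse=True): if idx < len(result): del result[idx]
-- (the guarded 'del result[idx]' is eraseIdx idx.toNat: every idx in the constant dict is nonnegative)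
def pvB_del (rows' : List String) (idxs : List Int) : List String :=
  idxs.foldl (fun r idx => if idx < (r.length : Int) then r.eraseIdx idx.toNat else r) rows'

def filter_corrupted_lines_alt (year : Int) (rows : List String) : List String :=
  match corruptedIdxDict.get? year with   -- 'if year not in corrupted_idx_dict: return rows'
  | some corrupted => pvB_del rows (PySem.List.sorted corrupted (fun x => x) true)
  | none => rows

-- ===== PRECONDITION & SPEC =====
def Spec_filter_corrupted_lines (year : Int) (rows : List String) (out : List String) : Prop := out = filter_corrupted_lines_alt year rows
instance (year : Int) (rows : List String) (out : List String) : Decidable (Spec_filter_corrupted_lines year rows out) := by unfold Spec_filter_corrupted_lines; infer_instance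

-- ===== CLAIM (what is proved, stated in full; the proofs are below) =====
def Claim_equal_filter_corrupted_lines : Prop := ∀ (year : Int) (rows : List String), Dom_filter_corrupted_lines year rows → Spec_filter_corrupted_lines year rows (filter_corrupted_lines year rows)

-- ===== LEMMAS AND PROOFS =====

-- A's loop is a filter of the enumeration
theorem pvA_loop_eq_filter (corrupted : List Int) (rows : List String) :
    pvA_loop corrupted rows =
      ((PySem.List.enumerate rows).filter (fun p => !corrupted.contains p.1)).map (·.2) := by
  unfold pvA_loop
  rw [show (fun (acc : List String) (p : Int × String) =>
        if corrupted.contains p.1 then acc else acc ++ [p.2]) =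
      (fun acc p => if !corrupted.contains p.1 then acc ++ [p.2] else acc) from by
    funext acc p; cases corrupted.contains p.1 <;> rfl]
  rw [PySem.List.foldl_append_if]
  simp

-- dropping a single index s+k from the enumeration erases position k
theorem filter_enum_single (rows : List String) (k : Nat) (s : Int) :
    ((PySem.List.enumerate rows s).filter (fun p => !(p.1 == s + (k : Int)))).map (·.2)
      = rows.eraseIdx k := by
  induction rows generalizing k s with
  | nil => simp [PySem.List.enumerate_nil]
  | cons x xs ih =>
    rw [PySem.List.enumerate_cons]
    cases k with
    | zero =>
      rw [List.filter_cons_of_neg (by simp)]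
      have hall : (PySem.List.enumerate xs (s + 1)).filter (fun p => !(p.1 == s + ((0 : Nat) : Int)))
          = PySem.List.enumerate xs (s + 1) := by
        apply List.filter_eq_self.mpr
        intro p hp
        rcases (PySem.List.mem_enumerate_iff _ _ _).1 hp with ⟨j, hj, rfl⟩
        simp; omega
      rw [hall, PySem.List.map_snd_enumerate]
      simp
    | succ j =>
      rw [List.filter_cons_of_pos (by simp; omega)]
      have hpred : (PySem.List.enumerate xs (s + 1)).filter (fun p => !(p.1 == s + ((j + 1 : Nat) : Int)))
          = (PySem.List.enumerate xs (s + 1)).filter (fun p => !(p.1 == (s + 1) + (j : Int))) := by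
        apply List.filter_congr; intro p _
        have h1 : s + ((j + 1 : Nat) : Int) = (s + 1) + (j : Int) := by push_cast; ring
        rw [h1]
      rw [List.map_cons, hpred, ih j (s + 1)]
      simp [List.eraseIdx_cons_succ]


-- dropping two indices s+k1 < s+k2 erases position k2 then k1
theorem filter_enum_pair (rows : List String) (k1 k2 : Nat) (h : k1 < k2) (s : Int) :
    ((PySem.List.enumerate rows s).filter
        (fun p => !(p.1 == s + (k1 : Int) || p.1 == s + (k2 : Int)))).map (·.2)
      = (rows.eraseIdx k2).eraseIdx k1 := by
  induction rows generalizing k1 k2 s with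
  | nil => simp [PySem.List.enumerate_nil]
  | cons x xs ih =>
    rw [PySem.List.enumerate_cons]
    cases k1 with
    | zero =>
      obtain ⟨j2, rfl⟩ : ∃ j2, k2 = j2 + 1 := ⟨k2 - 1, by omega⟩
      rw [List.filter_cons_of_neg (by simp)]
      have hcong : (PySem.List.enumerate xs (s + 1)).filter
            (fun p => !(p.1 == s + ((0 : Nat) : Int) || p.1 == s + ((j2 + 1 : Nat) : Int)))
          = (PySem.List.enumerate xs (s + 1)).filter (fun p => !(p.1 == (s + 1) + (j2 : Int))) := by
        apply List.filter_congr; intro p hp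
        rcases (PySem.List.mem_enumerate_iff _ _ _).1 hp with ⟨j, hj, rfl⟩
        have h1 : (s + 1 + (j : Int) == s + ((0 : Nat) : Int)) = false := by simp; omega
        have h2 : s + ((j2 + 1 : Nat) : Int) = (s + 1) + (j2 : Int) := by push_cast; ring
        rw [h1, h2]; simp
      rw [hcong, filter_enum_single xs j2 (s + 1)]
      simp
    | succ j1 =>
      obtain ⟨j2, rfl⟩ : ∃ j2, k2 = j2 + 1 := ⟨k2 - 1, by omega⟩
      rw [List.filter_cons_of_pos (by simp; omega)]
      have hcong : (PySem.List.enumerate xs (s + 1)).filter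
            (fun p => !(p.1 == s + ((j1 + 1 : Nat) : Int) || p.1 == s + ((j2 + 1 : Nat) : Int)))
          = (PySem.List.enumerate xs (s + 1)).filter
            (fun p => !(p.1 == (s + 1) + (j1 : Int) || p.1 == (s + 1) + (j2 : Int))) := by
        apply List.filter_congr; intro p _
        have h1 : s + ((j1 + 1 : Nat) : Int) = (s + 1) + (j1 : Int) := by push_cast; ring
        have h2 : s + ((j2 + 1 : Nat) : Int) = (s + 1) + (j2 : Int) := by push_cast; ring
        rw [h1, h2]
      rw [List.map_cons, hcong, ih j1 j2 (by omega) (s + 1)]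
      simp [List.eraseIdx_cons_succ]


-- B's guarded delete step is exactly eraseIdx (out of range erases nothing)
theorem guard_erase (k : Nat) (r : List String) :
    (if ((k : Int) < (r.length : Int)) then r.eraseIdx ((k : Int)).toNat else r)
      = r.eraseIdx k := by
  by_cases h : k < r.length
  · simp [h]
  · rw [if_neg (by exact_mod_cast h), List.eraseIdx_of_length_le (by omega)]

-- the two programs agree once the dict lookup yields one index
theorem case_single (k : Nat) (rows : List String) :
    pvA_loop [(k : Int)] rows = pvB_del rows (PySem.List.sorted [(k : Int)] (fun x => x) true) := by
  have hs : PySem.List.sorted [(k : Int)] (fun x => x) true = [(k : Int)] :=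
    PySem.List.sorted_rev_eq_self_of_pairwise _ _ (by simp)
  rw [hs, pvA_loop_eq_filter]
  unfold pvB_del
  simp only [List.foldl_cons, List.foldl_nil]
  rw [guard_erase k rows, ← filter_enum_single rows k 0]
  congr 1
  apply List.filter_congr; intro p _
  simp [Bool.beq_eq_decide_eq]

-- …or two indices k1 < k2 (B visits them in descending order)
theorem case_pair (k1 k2 : Nat) (h : k1 < k2) (rows : List String) :
    pvA_loop [(k1 : Int), (k2 : Int)] rows
      = pvB_del rows (PySem.List.sorted [(k1 : Int), (k2 : Int)] (fun x => x) true) := by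
  have hs : PySem.List.sorted [(k1 : Int), (k2 : Int)] (fun x => x) true = [(k2 : Int), (k1 : Int)] :=
    PySem.List.sorted_rev_eq_of_perm_of_pairwise_gt _ _ _ (List.Perm.swap _ _ _)
      (by simp; exact_mod_cast h)
  rw [hs, pvA_loop_eq_filter]
  unfold pvB_del
  simp only [List.foldl_cons, List.foldl_nil]
  rw [guard_erase k2 rows, guard_erase k1 (rows.eraseIdx k2),
    ← filter_enum_pair rows k1 k2 h 0]
  congr 1
  apply List.filter_congr; intro p _
  simp [Bool.beq_eq_decide_eq]

-- ===== VERDICT (by name: the statement is the Claim_ definition above) =====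
theorem filter_corrupted_lines_spec : Claim_equal_filter_corrupted_lines := by
  intro year rows _
  unfold Spec_filter_corrupted_lines filter_corrupted_lines filter_corrupted_lines_alt
  by_cases h7 : year = 2007
  · subst h7; exact case_single 33213 rows
  by_cases h8 : year = 2008
  · subst h8; exact case_single 22489 rows
  by_cases h9 : year = 2009
  · subst h9; exact case_pair 64621 165454 (by omega) rows
  by_cases h15 : year = 2015
  · subst h15; exact case_pair 42007 94935 (by omega) rows
  by_cases h16 : year = 2016
  · subst h16; exact case_single 111398 rows
  by_cases h19 : year = 2019
  · subst h19; exact case_pair 41309 136814 (by omega) rows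
  by_cases h20 : year = 2020
  · subst h20; exact case_single 102074 rows
  by_cases h21 : year = 2021
  · subst h21; exact case_pair 32013 55660 (by omega) rows
  · have hmk : corruptedIdxDict = PySem.Dict.mk [(2007, [33213]), (2008, [22489]),
        (2009, [64621, 165454]), (2015, [42007, 94935]), (2016, [111398]),
        (2019, [41309, 136814]), (2020, [102074]), (2021, [32013, 55660])] := by decide
    have hnone : corruptedIdxDict.get? year = none := by
      rw [hmk]
      simp only [PySem.Dict.get?_mk_cons, beq_iff_eq]
      rw [if_neg (by omega), if_neg (by omega), if_neg (by omega), if_neg (by omega),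
        if_neg (by omega), if_neg (by omega), if_neg (by omega), if_neg (by omega)]
      rfl
    rw [hnone]
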